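-- pv_equiv track=rewrite | github.com/aurora0110/fintech | utils/backtest/run_brick_turn_param_experiment.py | max_consecutive_failures
-- ===== SOURCE A (Python) =====
-- from typing import Dict, Iterable, List, Optional
--
-- def max_consecutive_failures(success_flags: Iterable[bool]) -> int:
--     current = 0
--     worst = 0
--     for flag in success_flags:
--         if flag:
--             current = 0
--         else:
--             current += 1
--             worst = max(worst, current)
--     return worst
-- ===== SOURCE B (Python) =====
-- def max_consecutive_failures(success_flags):
--     flags = list(success_flags)
--     marks = [-1] + [i for i, f in enumerate(flags) if f] + [len(flags)]
--     return max(b - a - 1 for a, b in zip(marks, marks[1:]))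
-- ===== Notes on version B (the rewrite author's own statement) =====
-- stated objective: alternative
-- what changed: B computes the positions of the True flags (with sentinels -1 and len) and returns the maximum gap between consecutive marker positions, instead of A's running reset counter over the flags.
import Mathlib
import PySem

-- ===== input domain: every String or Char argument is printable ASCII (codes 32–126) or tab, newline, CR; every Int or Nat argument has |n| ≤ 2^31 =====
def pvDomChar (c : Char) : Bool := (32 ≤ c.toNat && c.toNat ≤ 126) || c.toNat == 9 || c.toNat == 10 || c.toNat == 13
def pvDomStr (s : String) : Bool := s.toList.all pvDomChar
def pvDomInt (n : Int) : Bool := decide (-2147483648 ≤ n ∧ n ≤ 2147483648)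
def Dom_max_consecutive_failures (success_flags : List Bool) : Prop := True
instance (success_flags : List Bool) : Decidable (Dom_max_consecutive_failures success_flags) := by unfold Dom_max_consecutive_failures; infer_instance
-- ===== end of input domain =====

-- B records the positions of the True flags (with sentinels -1 and len) and returns the
-- maximum gap between consecutive marker positions, instead of A's running reset counter.

-- ===== PORT A =====
-- the loop body: state (current, worst)
def pvStepA (s : Int × Int) (flag : Bool) : Int × Int :=
  if flag then (0, s.2) else (s.1 + 1, max s.2 (s.1 + 1))

def max_consecutive_failures (success_flags : List Bool) : Int :=
  (success_flags.foldl pvStepA (0, 0)).2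

-- ===== PORT B =====
-- adjacent-pair gaps: the `b - a - 1 for a, b in zip(marks, marks[1:])` generator
def pvGaps (marks : List Int) : List Int :=
  (marks.zip marks.tail).map (fun p => p.2 - p.1 - 1)

def max_consecutive_failures_alt (success_flags : List Bool) : Int :=
  let marks : List Int :=
    -1 :: ((PySem.List.enumerate success_flags 0).filter (fun p => p.2)).map (fun p => p.1)
      ++ [(success_flags.length : Int)]
  match pvGaps marks with
  | [] => 0                       -- unreachable: marks has ≥ 2 elements (Python's max would raise)
  | g :: gs => gs.foldl max g

-- ===== PRECONDITION & SPEC =====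
def Spec_max_consecutive_failures (success_flags : List Bool) (out : Int) : Prop := out = max_consecutive_failures_alt success_flags
instance (success_flags : List Bool) (out : Int) : Decidable (Spec_max_consecutive_failures success_flags out) := by unfold Spec_max_consecutive_failures; infer_instance

-- ===== CLAIM (what is proved, stated in full; the proofs are below) =====
def Claim_equal_max_consecutive_failures : Prop := ∀ (success_flags : List Bool), Dom_max_consecutive_failures success_flags → Spec_max_consecutive_failures success_flags (max_consecutive_failures success_flags)

-- ===== LEMMAS AND PROOFS =====

-- A's loop written as structural recursion on the flags with the carried failure count
def pvG (c : Int) : List Bool → Int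
  | [] => c
  | true :: t => max c (pvG 0 t)
  | false :: t => pvG (c + 1) t

theorem pvG_ge (l : List Bool) : ∀ c : Int, c ≤ pvG c l := by
  induction l with
  | nil => intro c; simp [pvG]
  | cons h t ih =>
    intro c
    cases h with
    | true => simp [pvG]
    | false =>
      calc c ≤ c + 1 := by omega
        _ ≤ pvG (c + 1) t := ih _
      
theorem pvFoldA_eq_pvG (l : List Bool) : ∀ c w : Int, 0 ≤ c → c ≤ w →
    (l.foldl pvStepA (c, w)).2 = max w (pvG c l) := by
  induction l with
  | nil => intro c w _ h; simp [pvG, max_eq_left h]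
  | cons hd t ih =>
    intro c w hc h
    cases hd with
    | true =>
      simp only [List.foldl, pvStepA, reduceIte, pvG]
      rw [ih 0 w (le_refl 0) (by omega), ← max_assoc, max_eq_left h]
    | false =>
      simp only [List.foldl, pvStepA, Bool.false_eq_true, if_false, pvG]
      rw [ih (c + 1) (max w (c + 1)) (by omega) (le_max_right _ _)]
      have := pvG_ge t (c + 1)
      omega

-- the marker positions of the true flags, from an absolute start index
def pvIdxFrom (s : Int) : List Bool → List Int
  | [] => []
  | true :: t => s :: pvIdxFrom (s + 1) t
  | false :: t => pvIdxFrom (s + 1) t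

theorem pvEnum_idx (l : List Bool) : ∀ s : Int,
    ((PySem.List.enumerate l s).filter (fun p => p.2)).map (fun p => p.1) = pvIdxFrom s l := by
  induction l with
  | nil => intro s; simp [PySem.List.enumerate_nil, pvIdxFrom]
  | cons h t ih =>
    intro s
    cases h <;> simp [PySem.List.enumerate_cons, pvIdxFrom, ih]

def pvMaxList : List Int → Int
  | [] => 0
  | g :: gs => gs.foldl max g

theorem pvMaxList_cons (a b : Int) (r : List Int) :
    pvMaxList (a :: b :: r) = max a (pvMaxList (b :: r)) := by
  simp only [pvMaxList, List.foldl]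
  induction r generalizing a b with
  | nil => simp
  | cons x r ih =>
    simp only [List.foldl]
    rw [ih (max a b) x, ih b x]
    omega

theorem pvGaps_cons (a b : Int) (r : List Int) :
    pvGaps (a :: b :: r) = (b - a - 1) :: pvGaps (b :: r) := by
  simp [pvGaps]

theorem pvGaps_ne_nil (a : Int) (xs : List Int) (n : Int) :
    pvGaps (a :: (xs ++ [n])) ≠ [] := by
  cases xs <;> simp [pvGaps]

theorem pvMaxList_cons' (a : Int) (gs : List Int) (h : gs ≠ []) :
    pvMaxList (a :: gs) = max a (pvMaxList gs) := by
  cases gs with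
  | nil => exact absurd rfl h
  | cons b r => exact pvMaxList_cons a b r

-- the key correspondence: max gap over markers starting at `a`, flags indexed from `s`
theorem pvMain (l : List Bool) : ∀ s a : Int,
    pvMaxList (pvGaps (a :: (pvIdxFrom s l ++ [s + l.length]))) = pvG (s - a - 1) l := by
  induction l with
  | nil =>
    intro s a
    simp [pvIdxFrom, pvGaps, pvMaxList, pvG]
  | cons h t ih =>
    intro s a
    cases h with
    | true =>
      simp only [pvIdxFrom, List.cons_append, List.length_cons, pvG]
      push_cast
      rw [pvGaps_cons, pvMaxList_cons' _ _ (pvGaps_ne_nil s (pvIdxFrom (s + 1) t) (s + ((t.length : Int) + 1)))]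
      rw [show s + ((t.length : Int) + 1) = (s + 1) + t.length by ring]
      rw [ih (s + 1) s]
      simp
    | false =>
      simp only [pvIdxFrom, List.length_cons, pvG]
      push_cast
      rw [show s + ((t.length : Int) + 1) = (s + 1) + t.length by ring]
      rw [ih (s + 1) a]
      congr 1
      ring

theorem pvAlt_eq_pvG (l : List Bool) :
    max_consecutive_failures_alt l = pvG 0 l := by
  unfold max_consecutive_failures_alt
  rw [pvEnum_idx l 0]
  have h := pvMain l 0 (-1)
  simp only [zero_add] at h
  simp only [List.cons_append] at h ⊢
  cases hg : pvGaps (-1 :: (pvIdxFrom 0 l ++ [(l.length : Int)])) with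
  | nil => exact absurd hg (pvGaps_ne_nil _ _ _)
  | cons g gs =>
    rw [hg] at h
    show List.foldl max g gs = pvG 0 l
    rw [show (List.foldl max g gs : Int) = pvMaxList (g :: gs) from rfl, h]
    norm_num

-- ===== VERDICT (by name: the statement is the Claim_ definition above) =====
theorem max_consecutive_failures_spec : Claim_equal_max_consecutive_failures := by
  intro l _
  unfold Spec_max_consecutive_failures max_consecutive_failures
  rw [pvAlt_eq_pvG, pvFoldA_eq_pvG l 0 0 (le_refl 0) (le_refl 0)]
  have := pvG_ge l 0
  omega
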